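-- pv_equiv track=rewrite | github.com/neuron1st/liang-barsky-algorithm | main.py | sort_vertices_clockwise
-- ===== SOURCE A (Python) =====
-- def sort_vertices_clockwise(vertices):
--     min_x, min_y = max_x, max_y = vertices[0][0], vertices[0][1]
--
--     for x, y in vertices:
--         if x < min_x:
--             min_x = x
--         if x > max_x:
--             max_x = x
--         if y < min_y:
--             min_y = y
--         if y > max_y:
--             max_y = y
--
--     sorted_vertices = [(min_x, min_y), (max_x, min_y),
--                        (max_x, max_y), (min_x, max_y)]
--
--     return sorted_vertices
-- ===== SOURCE B (Python) =====
-- def sort_vertices_clockwise(vertices):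
--     xs = sorted(x for x, y in vertices)
--     ys = sorted(y for x, y in vertices)
--     return [(xs[0], ys[0]), (xs[-1], ys[0]), (xs[-1], ys[-1]), (xs[0], ys[-1])]
-- ===== Notes on version B (the rewrite author's own statement) =====
-- stated objective: alternative
-- what changed: Replaces A's single-pass running-extrema loop with a sort-based selection: sort the x- and y-projections and read min/max off the first and last positions of the sorted lists.
import Mathlib
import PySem

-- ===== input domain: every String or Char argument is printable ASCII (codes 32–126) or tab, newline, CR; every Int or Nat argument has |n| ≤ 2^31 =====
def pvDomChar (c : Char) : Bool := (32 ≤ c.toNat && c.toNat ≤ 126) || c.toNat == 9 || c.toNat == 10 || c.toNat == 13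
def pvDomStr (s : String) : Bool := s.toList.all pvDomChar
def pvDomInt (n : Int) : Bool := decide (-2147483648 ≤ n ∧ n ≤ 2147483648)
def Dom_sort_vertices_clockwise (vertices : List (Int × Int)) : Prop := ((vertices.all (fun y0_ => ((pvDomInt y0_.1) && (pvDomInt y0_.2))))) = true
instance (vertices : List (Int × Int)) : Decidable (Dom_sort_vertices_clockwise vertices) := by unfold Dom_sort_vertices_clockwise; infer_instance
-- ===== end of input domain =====

-- B replaces A's single-pass running-extrema loop by sort-based selection: sort the
-- coordinate projections and read the extremes off the ends (objective: alternative).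

-- ===== PORT A =====
def sort_vertices_clockwise (vertices : List (Int × Int)) : List (Int × Int) :=
  match vertices with
  | [] => []  -- vertices[0] raises IndexError here; excluded by Pre_
  | v0 :: _ =>
    let s := vertices.foldl
      (fun (st : Int × Int × Int × Int) p =>
        let mnx := if p.1 < st.1 then p.1 else st.1
        let mxx := if p.1 > st.2.1 then p.1 else st.2.1
        let mny := if p.2 < st.2.2.1 then p.2 else st.2.2.1
        let mxy := if p.2 > st.2.2.2 then p.2 else st.2.2.2
        (mnx, mxx, mny, mxy))
      (v0.1, v0.1, v0.2, v0.2)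
    [(s.1, s.2.2.1), (s.2.1, s.2.2.1), (s.2.1, s.2.2.2), (s.1, s.2.2.2)]

-- ===== PORT B =====
def sort_vertices_clockwise_alt (vertices : List (Int × Int)) : List (Int × Int) :=
  let xs := PySem.List.sorted (vertices.map Prod.fst) (fun y => y) false
  let ys := PySem.List.sorted (vertices.map Prod.snd) (fun y => y) false
  match PySem.List.pyGet? xs 0, PySem.List.pyGet? xs (-1),
        PySem.List.pyGet? ys 0, PySem.List.pyGet? ys (-1) with
  | some x0, some x1, some y0, some y1 =>
      [(x0, y0), (x1, y0), (x1, y1), (x0, y1)]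
  | _, _, _, _ => []  -- empty input: xs[0] raises IndexError; excluded by Pre_

-- ===== PRECONDITION & SPEC =====
-- Pre_ excludes only the empty list, on which both A and B raise IndexError.
def Pre_sort_vertices_clockwise (vertices : List (Int × Int)) : Prop := vertices ≠ []
instance (vertices : List (Int × Int)) : Decidable (Pre_sort_vertices_clockwise vertices) := by unfold Pre_sort_vertices_clockwise; infer_instance
def pvWitness_sort_vertices_clockwise : (List (Int × Int)) := [(1, 2), (3, 0)]
def Spec_sort_vertices_clockwise (vertices : List (Int × Int)) (out : List (Int × Int)) : Prop := out = sort_vertices_clockwise_alt vertices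
instance (vertices : List (Int × Int)) (out : List (Int × Int)) : Decidable (Spec_sort_vertices_clockwise vertices out) := by unfold Spec_sort_vertices_clockwise; infer_instance

-- ===== CLAIM =====
def Claim_equal_sort_vertices_clockwise : Prop := ∀ (vertices : List (Int × Int)), Dom_sort_vertices_clockwise vertices → Pre_sort_vertices_clockwise vertices → Spec_sort_vertices_clockwise vertices (sort_vertices_clockwise vertices)

-- ===== LEMMAS AND PROOFS =====
theorem pv_min (a x : Int) : (if x < a then x else a) = min a x := by
  rw [min_def]; split_ifs <;> omega

theorem pv_max (b : Int) (x : Int) : (if x > b then x else b) = max b x := by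
  rw [max_def]; split_ifs <;> omega

-- A's loop computes foldl min / foldl max over the two coordinate projections.
theorem pv_fold_extrema (t : List (Int × Int)) (a b c d : Int) :
    t.foldl
      (fun (st : Int × Int × Int × Int) p =>
        let mnx := if p.1 < st.1 then p.1 else st.1
        let mxx := if p.1 > st.2.1 then p.1 else st.2.1
        let mny := if p.2 < st.2.2.1 then p.2 else st.2.2.1
        let mxy := if p.2 > st.2.2.2 then p.2 else st.2.2.2
        (mnx, mxx, mny, mxy))
      (a, b, c, d)
    = ((t.map Prod.fst).foldl min a, (t.map Prod.fst).foldl max b,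
       (t.map Prod.snd).foldl min c, (t.map Prod.snd).foldl max d) := by
  induction t generalizing a b c d with
  | nil => rfl
  | cons p r ih =>
    simp only [List.foldl_cons, List.map_cons]
    rw [ih, pv_min, pv_max, pv_min, pv_max]

-- In a ≤-sorted nonempty list, the last element bounds every member from above.
theorem pv_le_getLast (l : List Int) (h : l ≠ []) (hp : l.Pairwise (· ≤ ·)) :
    ∀ y ∈ l, y ≤ l.getLast h := by
  induction l with
  | nil => simp at h
  | cons a t ih =>
    intro y hy
    rcases List.pairwise_cons.mp hp with ⟨ha, hpt⟩
    cases t with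
    | nil => rcases List.mem_singleton.mp hy with rfl; simp
    | cons b u =>
      have hbu : b :: u ≠ [] := by simp
      have hre : (a :: b :: u).getLast h = (b :: u).getLast hbu := List.getLast_cons hbu
      rcases List.mem_cons.mp hy with rfl | hyt
      · rw [hre]; exact ha _ (List.getLast_mem _)
      · rw [hre]; exact ih hbu hpt y hyt

-- The head of sorted(a :: t) is the running minimum t.foldl min a.
theorem pv_head_sorted (a : Int) (t : List Int) :
    (PySem.List.sorted (a :: t) (fun y => y) false).head (by
      simp [PySem.List.sorted_eq_nil_iff]) = t.foldl min a := by
  set s := PySem.List.sorted (a :: t) (fun y => y) false with hs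
  have hne : s ≠ [] := by simp [hs, PySem.List.sorted_eq_nil_iff]
  obtain ⟨m, r, hmr⟩ := List.exists_cons_of_ne_nil hne
  have hmin : PySem.List.min? (a :: t) (fun y => y) = some (t.foldl min a) :=
    PySem.List.min?_id_cons a t
  have hfmem : t.foldl min a ∈ (a :: t) := PySem.List.min?_mem hmin
  have hfle : ∀ y ∈ (a :: t), t.foldl min a ≤ y := fun y hy => PySem.List.min?_isMin hmin y hy
  have hmmem : m ∈ (a :: t) := by
    have : m ∈ s := by rw [hmr]; exact List.mem_cons_self
    exact (PySem.List.sorted_perm (a :: t) (fun y => y) false).subset this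
  have hmle : ∀ y ∈ (a :: t), m ≤ y := PySem.List.key_head_sorted_le _ _ (hs.symm.trans hmr)
  have hm : m = t.foldl min a := le_antisymm (hmle _ hfmem) (hfle _ hmmem)
  have h2 : s.head? = some m := by rw [hmr]; rfl
  have h3 : s.head? = some (s.head hne) := List.head?_eq_some_head hne
  rw [← hm]
  exact Option.some_inj.mp (h3.symm.trans h2)

-- The last element of sorted(a :: t) is the running maximum t.foldl max a.
theorem pv_getLast_sorted (a : Int) (t : List Int) :
    (PySem.List.sorted (a :: t) (fun y => y) false).getLast (by
      simp [PySem.List.sorted_eq_nil_iff]) = t.foldl max a := by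
  set s := PySem.List.sorted (a :: t) (fun y => y) false with hs
  have hne : s ≠ [] := by simp [hs, PySem.List.sorted_eq_nil_iff]
  have hmax : PySem.List.max? (a :: t) (fun y => y) = some (t.foldl max a) :=
    PySem.List.max?_id_cons a t
  have hfmem : t.foldl max a ∈ (a :: t) := PySem.List.max?_mem hmax
  have hfge : ∀ y ∈ (a :: t), y ≤ t.foldl max a := fun y hy => PySem.List.max?_isMax hmax y hy
  have hp : s.Pairwise (· ≤ ·) := by
    have := PySem.List.sorted_pairwise (xs := a :: t) (key := fun y => y)
    simpa [hs] using this
  have hlmem : s.getLast hne ∈ (a :: t) :=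
    (PySem.List.sorted_perm (a :: t) (fun y => y) false).subset (List.getLast_mem hne)
  have hlge : ∀ y ∈ s, y ≤ s.getLast hne := pv_le_getLast s hne hp
  have hfmem' : t.foldl max a ∈ s :=
    ((PySem.List.sorted_perm (a :: t) (fun y => y) false).mem_iff).mpr hfmem
  exact le_antisymm (hfge _ hlmem) (hlge _ hfmem')

-- pyGet? at 0 / -1 on the sorted projection is the running min / max.
theorem pv_pyGet0_sorted (a : Int) (t : List Int) :
    PySem.List.pyGet? (PySem.List.sorted (a :: t) (fun y => y) false) 0
      = some (t.foldl min a) := by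
  have hne : PySem.List.sorted (a :: t) (fun y => y) false ≠ [] := by
    simp [PySem.List.sorted_eq_nil_iff]
  rw [PySem.List.pyGet?_zero, ← List.head?_eq_getElem?, List.head?_eq_some_head hne,
    pv_head_sorted]

theorem pv_pyGetNeg1_sorted (a : Int) (t : List Int) :
    PySem.List.pyGet? (PySem.List.sorted (a :: t) (fun y => y) false) (-1)
      = some (t.foldl max a) := by
  have hne : PySem.List.sorted (a :: t) (fun y => y) false ≠ [] := by
    simp [PySem.List.sorted_eq_nil_iff]
  rw [PySem.List.pyGet?_neg_one, List.getLast?_eq_some_getLast hne, pv_getLast_sorted]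

-- ===== VERDICT =====
theorem sort_vertices_clockwise_spec : Claim_equal_sort_vertices_clockwise := by
  intro vertices _ hpre
  unfold Spec_sort_vertices_clockwise
  match vertices with
  | [] => exact absurd rfl hpre
  | v0 :: t =>
    simp only [sort_vertices_clockwise, sort_vertices_clockwise_alt, List.map_cons,
      List.foldl_cons, pv_fold_extrema, pv_pyGet0_sorted, pv_pyGetNeg1_sorted]
    simp
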